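-- pv_equiv track=rewrite | github.com/210222/polyglot-oracle | AI_Editor_System/legacy_backup/ai_editor_core（v10.1.1）.py | _sanitize_negative_prompts
-- ===== SOURCE A (Python) =====
-- def _sanitize_negative_prompts(prompt: str) -> str:
--     """Converts negatives to positives for Video models."""
--     replacements = {
--         "no shaking": "steady tripod shot",
--         "don't move": "static shot",
--         "no blur": "deep depth of field, sharp focus"
--     }
--     lower = prompt.lower()
--     for neg, pos in replacements.items():
--         if neg in lower: lower = lower.replace(neg, pos)
--     return lower
-- ===== SOURCE B (Python) =====
-- def _sanitize_negative_prompts(prompt: str) -> str: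
--     """Converts negatives to positives for Video models (single-pass scan)."""
--     rules = [("no shaking", "steady tripod shot"),
--              ("don't move", "static shot"),
--              ("no blur", "deep depth of field, sharp focus")]
--     s = prompt.lower()
--     pieces = []
--     i = 0
--     n = len(s)
--     while i < n:
--         for neg, pos in rules:
--             if s.startswith(neg, i):
--                 pieces.append(pos)
--                 i += len(neg)
--                 break
--         else:
--             pieces.append(s[i])
--             i += 1
--     return "".join(pieces)
-- ===== Notes on version B (the rewrite author's own statement) =====
-- stated objective: alternative
-- what changed: A lowercases and then runs three separate full-string str.replace passes (one per phrase); B lowercases and makes a single left-to-right scan that, at each position, substitutes the first matching phrase (or copies the character), building the output in one pass.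
import Mathlib
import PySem

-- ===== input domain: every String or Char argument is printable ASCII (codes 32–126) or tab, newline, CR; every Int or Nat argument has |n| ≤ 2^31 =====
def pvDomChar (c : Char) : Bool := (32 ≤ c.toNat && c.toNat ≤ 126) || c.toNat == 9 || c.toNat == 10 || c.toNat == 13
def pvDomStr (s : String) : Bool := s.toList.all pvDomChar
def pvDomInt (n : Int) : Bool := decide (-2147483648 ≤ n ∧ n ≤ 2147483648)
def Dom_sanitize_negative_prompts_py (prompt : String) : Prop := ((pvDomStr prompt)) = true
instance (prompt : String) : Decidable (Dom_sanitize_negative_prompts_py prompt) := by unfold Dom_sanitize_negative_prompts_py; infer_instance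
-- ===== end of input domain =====

-- B replaces A's three sequential full-string replace passes by one left-to-right scan that
-- substitutes each phrase at its first match; objective: alternative (single pass, same result).

-- ===== PORT A =====
-- A: lowercase, then for each (neg, pos) in the dict, if neg is contained, replace all of neg.
def sanitize_negative_prompts_py (prompt : String) : String :=
  let replacements : List (String × String) :=
    [("no shaking", "steady tripod shot"),
     ("don't move", "static shot"),
     ("no blur", "deep depth of field, sharp focus")]
  let lower := PySem.Str.lower prompt
  replacements.foldl
    (fun lower np =>
      if PySem.Str.isIn np.1 lower then PySem.Str.replace lower np.1 np.2 else lower)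
    lower

-- ===== PORT B =====
-- B's while loop over the lowered string: at each position try the three phrases in order;
-- on a match emit the replacement and jump past the phrase, else emit the character.
def scanAux : List Char → List Char
  | [] => []
  | c :: t =>
    if ("no shaking".toList).isPrefixOf (c :: t) then
      "steady tripod shot".toList ++ scanAux (t.drop 9)
    else if ("don't move".toList).isPrefixOf (c :: t) then
      "static shot".toList ++ scanAux (t.drop 9)
    else if ("no blur".toList).isPrefixOf (c :: t) then
      "deep depth of field, sharp focus".toList ++ scanAux (t.drop 6)
    else c :: scanAux t
termination_by l => l.length
decreasing_by all_goals (simp; try omega)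

def sanitize_negative_prompts_py_alt (prompt : String) : String :=
  String.ofList (scanAux ((PySem.Str.lower prompt).toList))

-- ===== PRECONDITION & SPEC =====
def Spec_sanitize_negative_prompts_py (prompt : String) (out : String) : Prop := out = sanitize_negative_prompts_py_alt prompt
instance (prompt : String) (out : String) : Decidable (Spec_sanitize_negative_prompts_py prompt out) := by unfold Spec_sanitize_negative_prompts_py; infer_instance

-- ===== CLAIM (what is proved, stated in full; the proofs are below) =====
def Claim_equal_sanitize_negative_prompts_py : Prop := ∀ (prompt : String), Dom_sanitize_negative_prompts_py prompt → Spec_sanitize_negative_prompts_py prompt (sanitize_negative_prompts_py prompt)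

-- ===== LEMMAS AND PROOFS =====

-- Structural characterization of PySem.Chars.replace for a nonempty pattern.
def repAll (old new : List Char) : List Char → List Char
  | [] => []
  | c :: t =>
    if old.isPrefixOf (c :: t) then new ++ repAll old new (t.drop (old.length - 1))
    else c :: repAll old new t
termination_by l => l.length
decreasing_by all_goals (simp; try omega)

theorem go_eq (old new : List Char) (hold : old ≠ []) :
    ∀ fuel l acc, l.length ≤ fuel →
      PySem.Chars.replace.go old new fuel l acc = acc.reverse ++ repAll old new l := by
  intro fuel
  induction fuel with
  | zero =>
    intro l acc hl
    have : l = [] := by cases l <;> simp_all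
    subst this
    simp [PySem.Chars.replace.go, repAll]
  | succ n ih =>
    intro l acc hl
    cases l with
    | nil => simp [PySem.Chars.replace.go, repAll]
    | cons c t =>
      rw [PySem.Chars.replace.go]
      by_cases h : old.isPrefixOf (c :: t) = true
      · rw [if_pos h]
        have hlen : old.length ≥ 1 := by cases old <;> simp_all
        have hdrop : List.drop old.length (c :: t) = t.drop (old.length - 1) := by
          cases old with
          | nil => simp_all
          | cons o os => simp
        rw [ih _ _ (by simp [hdrop]; simp at hl; omega)]
        rw [repAll, if_pos h, hdrop]
        simp
      · rw [if_neg h, ih _ _ (by simp at hl ⊢; omega)]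
        rw [repAll, if_neg h]
        simp

theorem replace_eq (s old new : List Char) (hold : old ≠ []) :
    PySem.Chars.replace s old new = repAll old new s := by
  rw [PySem.Chars.replace, if_neg (by simpa using hold)]
  simpa using go_eq old new hold s.length s [] le_rfl

theorem repAll_nil (old new : List Char) : repAll old new [] = [] := by rw [repAll]

theorem repAll_skip (old new : List Char) (c : Char) (t : List Char)
    (h : ¬ old <+: (c :: t)) : repAll old new (c :: t) = c :: repAll old new t := by
  rw [repAll, if_neg (by simpa [List.isPrefixOf_iff_prefix] using h)]

theorem repAll_pre (old new x : List Char) (hold : old ≠ []) :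
    repAll old new (old ++ x) = new ++ repAll old new x := by
  cases old with
  | nil => exact absurd rfl hold
  | cons o os =>
    rw [List.cons_append, repAll, if_pos (by simp [List.isPrefixOf_iff_prefix])]
    simp

theorem repAll_id (old new : List Char) (s : List Char) (h : ¬ old <:+: s) :
    repAll old new s = s := by
  induction s with
  | nil => exact repAll_nil _ _
  | cons c t ih =>
    rw [repAll_skip _ _ _ _ (fun hp => h hp.isInfix)]
    rw [ih (fun hi => h (List.infix_cons hi))]

-- `a` contains no start of an occurrence of `old` that could reach past `a`'s end:
-- no nonempty suffix of `a` is a prefix of `old`, and `old` is not a prefix of any suffix.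
abbrev SafeSeg (a old : List Char) : Prop :=
  ∀ k, k < a.length → ¬ (a.drop k <+: old) ∧ ¬ (old <+: a.drop k)

theorem SafeSeg_tail {c : Char} {a old : List Char} (h : SafeSeg (c :: a) old) : SafeSeg a old := by
  intro k hk
  simpa using h (k + 1) (by simpa using hk)

theorem repAll_comm (old new : List Char) (a : List Char) (hS : SafeSeg a old) :
    ∀ x, repAll old new (a ++ x) = a ++ repAll old new x := by
  induction a with
  | nil => simp
  | cons c a' ih =>
    intro x
    have h0 := hS 0 (by simp)
    simp only [List.drop_zero] at h0
    have hnp : ¬ old <+: ((c :: a') ++ x) := by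
      intro h
      rcases List.prefix_or_prefix_of_prefix h (List.prefix_append (c :: a') x) with h' | h'
      · exact h0.2 h'
      · exact h0.1 h'
    rw [List.cons_append, repAll_skip _ _ _ _ (by simpa using hnp)]
    rw [ih (SafeSeg_tail hS)]
    rfl

theorem prefix_repAll (old new : List Char) :
    ∀ y s, SafeSeg s new → s <+: repAll old new y → s <+: y := by
  intro y
  fun_induction repAll old new y with
  | case1 => intro s _ h; simpa using h
  | case2 c t hpre ih =>
    intro s hS h
    cases s with
    | nil => exact List.nil_prefix
    | cons b s' =>
      exfalso
      have h0 := hS 0 (by simp)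
      simp only [List.drop_zero] at h0
      rcases List.prefix_or_prefix_of_prefix h (List.prefix_append new _) with h' | h'
      · exact h0.1 h'
      · exact h0.2 h'
  | case3 c t hpre ih =>
    intro s hS h
    cases s with
    | nil => exact List.nil_prefix
    | cons b s' =>
      rw [List.cons_prefix_cons] at h ⊢
      exact ⟨h.1, ih s' (SafeSeg_tail hS) h.2⟩

theorem prefix_cons_repAll (old new : List Char) {s : List Char} {c : Char} {t : List Char}
    (hS : SafeSeg s new) (h : s <+: c :: repAll old new t) : s <+: c :: t := by
  cases s with
  | nil => exact List.nil_prefix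
  | cons b s' =>
    rw [List.cons_prefix_cons] at h ⊢
    exact ⟨h.1, prefix_repAll old new t s' (SafeSeg_tail hS) h.2⟩

theorem scan_pre1 (x : List Char) :
    scanAux ("no shaking".toList ++ x) = "steady tripod shot".toList ++ scanAux x := by
  show scanAux ('n'::'o'::' '::'s'::'h'::'a'::'k'::'i'::'n'::'g'::x) = _
  rw [scanAux]
  simp [show "no shaking".toList = ['n','o',' ','s','h','a','k','i','n','g'] from rfl]

theorem scan_pre2 (x : List Char) :
    scanAux ("don't move".toList ++ x) = "static shot".toList ++ scanAux x := by
  show scanAux ('d'::'o'::'n'::'\''::'t'::' '::'m'::'o'::'v'::'e'::x) = _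
  rw [scanAux]
  simp [List.cons_prefix_cons,
    show "no shaking".toList = ['n','o',' ','s','h','a','k','i','n','g'] from rfl,
    show "don't move".toList = ['d','o','n','\'','t',' ','m','o','v','e'] from rfl]

theorem scan_pre3 (x : List Char) :
    scanAux ("no blur".toList ++ x) = "deep depth of field, sharp focus".toList ++ scanAux x := by
  show scanAux ('n'::'o'::' '::'b'::'l'::'u'::'r'::x) = _
  rw [scanAux]
  simp [List.cons_prefix_cons,
    show "no shaking".toList = ['n','o',' ','s','h','a','k','i','n','g'] from rfl,
    show "don't move".toList = ['d','o','n','\'','t',' ','m','o','v','e'] from rfl,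
    show "no blur".toList = ['n','o',' ','b','l','u','r'] from rfl]

theorem scan_skip (c : Char) (t : List Char)
    (h1 : ¬ "no shaking".toList <+: (c :: t))
    (h2 : ¬ "don't move".toList <+: (c :: t))
    (h3 : ¬ "no blur".toList <+: (c :: t)) :
    scanAux (c :: t) = c :: scanAux t := by
  rw [scanAux, if_neg (by simpa [List.isPrefixOf_iff_prefix] using h1),
      if_neg (by simpa [List.isPrefixOf_iff_prefix] using h2),
      if_neg (by simpa [List.isPrefixOf_iff_prefix] using h3)]

theorem main_aux : ∀ n (cs : List Char), cs.length ≤ n →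
    repAll "no blur".toList "deep depth of field, sharp focus".toList
      (repAll "don't move".toList "static shot".toList
        (repAll "no shaking".toList "steady tripod shot".toList cs)) = scanAux cs := by
  intro n
  induction n with
  | zero =>
    intro cs h
    have : cs = [] := by cases cs <;> simp_all
    subst this
    simp [repAll_nil, scanAux]
  | succ n ih =>
    intro cs hlen
    by_cases h1 : "no shaking".toList <+: cs
    · obtain ⟨x, hx⟩ := h1
      subst hx
      rw [repAll_pre _ _ _ (by decide),
          repAll_comm _ _ _ (by decide),
          repAll_comm _ _ _ (by decide),
          scan_pre1, ih x (by simp at hlen ⊢; omega)]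
    · by_cases h2 : "don't move".toList <+: cs
      · obtain ⟨x, hx⟩ := h2
        subst hx
        rw [repAll_comm _ _ _ (by decide),
            repAll_pre _ _ _ (by decide),
            repAll_comm _ _ _ (by decide),
            scan_pre2, ih x (by simp at hlen ⊢; omega)]
      · by_cases h3 : "no blur".toList <+: cs
        · obtain ⟨x, hx⟩ := h3
          subst hx
          rw [repAll_comm _ _ _ (by decide),
              repAll_comm _ _ _ (by decide),
              repAll_pre _ _ _ (by decide),
              scan_pre3, ih x (by simp at hlen ⊢; omega)]
        · cases cs with
          | nil => simp [repAll_nil, scanAux]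
          | cons c t =>
            rw [repAll_skip _ _ _ _ h1]
            have h2' : ¬ "don't move".toList <+:
                c :: repAll "no shaking".toList "steady tripod shot".toList t :=
              fun h => h2 (prefix_cons_repAll _ _ (by decide) h)
            rw [repAll_skip _ _ _ _ h2']
            have h3' : ¬ "no blur".toList <+:
                c :: repAll "don't move".toList "static shot".toList
                  (repAll "no shaking".toList "steady tripod shot".toList t) :=
              fun h => h3 (prefix_cons_repAll _ _ (by decide)
                (prefix_cons_repAll _ _ (by decide) h))
            rw [repAll_skip _ _ _ _ h3', scan_skip _ _ h1 h2 h3,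
                ih t (by simp at hlen; omega)]

theorem step_toList (s old new : String) (hold : old.toList ≠ []) :
    (if PySem.Str.isIn old s then PySem.Str.replace s old new else s).toList
      = repAll old.toList new.toList s.toList := by
  by_cases hin : PySem.Str.isIn old s = true
  · rw [if_pos hin, PySem.Str.toList_replace, replace_eq _ _ _ hold]
  · have hni : ¬ old.toList <:+: s.toList := by
      rw [← PySem.Str.isIn_iff_infix]; simpa using hin
    rw [if_neg hin, repAll_id _ _ _ hni]

-- ===== VERDICT (by name: the statement is the Claim_ definition above) =====
theorem sanitize_negative_prompts_py_spec : Claim_equal_sanitize_negative_prompts_py := by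
  intro prompt _
  unfold Spec_sanitize_negative_prompts_py
  rw [← String.toList_inj]
  unfold sanitize_negative_prompts_py sanitize_negative_prompts_py_alt
  simp only [List.foldl]
  rw [step_toList _ _ _ (by decide), step_toList _ _ _ (by decide),
      step_toList _ _ _ (by decide),
      main_aux (PySem.Str.lower prompt).toList.length _ le_rfl]
  simp
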